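-- pv_equiv track=rewrite | github.com/adautobraz/ergo | late_night_sweetheart/scripts/Late Night Sweetheart.py | gen_entities
-- ===== SOURCE A (Python) =====
-- def gen_entities(title_ents, description_ents):
--     all_dicts = [title_ents, title_ents, description_ents]
--
--     unique_dict = {}
--     for d in all_dicts:
--         for k, v in d.items():
--             if k in unique_dict:
--                 unique_dict[k].append(v)
--             else:
--                 unique_dict[k] = [v]
--
--     ents_dict = {}
--     for k, v in unique_dict.items():
-- #         if 'PERSON' in v:
--         ents_dict[k] = v
--
--     ents_dict_len = {}
--     for k, v in ents_dict.items():
--         key_adj = k.replace('\'s', '').strip()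
--         ents_dict_len[key_adj] = len(v)
--
--     return ents_dict_len
-- ===== SOURCE B (Python) =====
-- def gen_entities(title_ents, description_ents):
--     # title is listed twice in the merge, so a title key counts 2 (+1 if also in description);
--     # a description-only key counts 1; insertion order: title keys first, then description-only keys.
--     ents_dict_len = {}
--     for k in title_ents:
--         ents_dict_len[k.replace('\'s', '').strip()] = 2 + (k in description_ents)
--     for k in description_ents:
--         if k not in title_ents:
--             ents_dict_len[k.replace('\'s', '').strip()] = 1
--     return ents_dict_len
-- ===== Notes on version B (the rewrite author's own statement) =====
-- stated objective: simpler
-- what changed: B drops A's merged-dict-of-value-lists pipeline (merge three dicts into lists, copy, then take lengths) and computes the counts directly in two passes: title keys get 2 plus 1 if also in description, then description-only keys get 1, preserving A's insertion order.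
import Mathlib
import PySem

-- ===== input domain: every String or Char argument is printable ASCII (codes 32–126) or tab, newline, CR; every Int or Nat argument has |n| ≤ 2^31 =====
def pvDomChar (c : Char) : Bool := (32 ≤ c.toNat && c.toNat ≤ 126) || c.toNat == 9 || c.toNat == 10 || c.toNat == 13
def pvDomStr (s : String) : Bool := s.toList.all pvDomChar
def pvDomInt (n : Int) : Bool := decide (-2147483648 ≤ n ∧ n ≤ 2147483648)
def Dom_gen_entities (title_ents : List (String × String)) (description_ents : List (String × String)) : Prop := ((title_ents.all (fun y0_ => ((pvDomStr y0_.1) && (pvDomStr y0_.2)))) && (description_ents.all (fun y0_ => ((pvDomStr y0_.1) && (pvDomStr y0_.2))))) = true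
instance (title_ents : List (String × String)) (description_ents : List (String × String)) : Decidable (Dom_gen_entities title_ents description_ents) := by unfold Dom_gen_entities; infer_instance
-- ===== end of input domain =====

-- B skips A's merged-lists/len pipeline: one pass over title keys (count 2, +1 if also in
-- description) and one pass over description-only keys (count 1); counts only, no value lists.
-- Python dict arguments are modelled as association lists read through PySem.Dict.ofList.

-- k.replace("'s", '').strip()  (the key transform both Pythons apply)
def pvAdj (k : String) : String := PySem.Str.strip (PySem.Str.replace k "'s" "")

-- ===== PORT A =====
def gen_entities (title_ents : List (String × String)) (description_ents : List (String × String)) : List (String × Int) :=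
  let title_d := PySem.Dict.ofList title_ents
  let description_d := PySem.Dict.ofList description_ents
  let all_dicts := [title_d, title_d, description_d]
  let unique_dict := all_dicts.foldl (fun u d =>
      d.items.foldl (fun u p =>
        if u.contains p.1 then u.modify p.1 [] (fun vs => vs ++ [p.2])
        else u.insert p.1 [p.2]) u) PySem.Dict.empty
  let ents_dict := unique_dict.items.foldl (fun e p => e.insert p.1 p.2)
      (PySem.Dict.empty : PySem.Dict String (List String))
  let ents_dict_len := ents_dict.items.foldl (fun e p =>
      e.insert (pvAdj p.1) ((p.2.length : Int)))
      (PySem.Dict.empty : PySem.Dict String Int)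
  ents_dict_len.items

-- ===== PORT B =====
def gen_entities_alt (title_ents : List (String × String)) (description_ents : List (String × String)) : List (String × Int) :=
  let title_d := PySem.Dict.ofList title_ents
  let description_d := PySem.Dict.ofList description_ents
  let r1 := title_d.keys.foldl (fun r k =>
      r.insert (pvAdj k) (2 + (if description_d.contains k then (1 : Int) else 0)))
      (PySem.Dict.empty : PySem.Dict String Int)
  let r2 := description_d.keys.foldl (fun r k =>
      if title_d.contains k then r else r.insert (pvAdj k) 1) r1
  r2.items

-- ===== PRECONDITION & SPEC =====
def Spec_gen_entities (title_ents : List (String × String)) (description_ents : List (String × String)) (out : List (String × Int)) : Prop := out = gen_entities_alt title_ents description_ents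
instance (title_ents : List (String × String)) (description_ents : List (String × String)) (out : List (String × Int)) : Decidable (Spec_gen_entities title_ents description_ents out) := by unfold Spec_gen_entities; infer_instance

-- ===== CLAIM (what is proved, stated in full; the proofs are below) =====
def Claim_equal_gen_entities : Prop := ∀ (title_ents : List (String × String)) (description_ents : List (String × String)), Dom_gen_entities title_ents description_ents → Spec_gen_entities title_ents description_ents (gen_entities title_ents description_ents)

-- ===== LEMMAS AND PROOFS =====

-- A's merge step (append if present, else start a fresh singleton) is exactly Dict.modify.
theorem pv_stepA_eq_modify {u : PySem.Dict String (List String)} {p : String × String} :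
    (if u.contains p.1 then u.modify p.1 [] (fun vs => vs ++ [p.2]) else u.insert p.1 [p.2])
      = u.modify p.1 [] (fun vs => vs ++ [p.2]) := by
  by_cases h : u.contains p.1
  · simp [h]
  · simp only [Bool.not_eq_true] at h
    simp [h, PySem.Dict.modify, PySem.Dict.getD_of_not_contains u [] h]

-- a fold that skips elements failing the guard is the fold over the filtered list
theorem pv_foldl_skip {α β : Type} (c : α → Bool) (g : β → α → β) :
    ∀ (l : List α) (b : β),
      l.foldl (fun r k => if c k then r else g r k) b
        = (l.filter (fun k => !c k)).foldl g b := by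
  intro l
  induction l with
  | nil => intro b; rfl
  | cons x xs ih =>
    intro b
    by_cases h : c x <;> simp [h, ih]

-- number of items of a Nodup-keyed dict carrying a given key
theorem pv_filter_length {ν : Type} (d : PySem.Dict String ν) (k : String)
    (hnd : d.keys.Nodup) :
    (d.items.filter (fun p => p.1 == k)).length
      = if k ∈ d.keys then 1 else 0 := by
  have hcount : (d.items.filter (fun p => p.1 == k)).length
      = d.keys.count k := by
    rw [List.count_eq_countP, ← List.countP_eq_length_filter,
      PySem.Dict.keys, List.countP_map]
    rfl
  rw [hcount]
  by_cases h : k ∈ d.keys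
  · simp [h, List.count_eq_one_of_mem hnd h]
  · simp [h, List.count_eq_zero_of_not_mem h]


-- function-level form of the merge-step rewrite
theorem pv_stepA_funext :
    (fun (u : PySem.Dict String (List String)) (p : String × String) =>
        if u.contains p.1 then u.modify p.1 [] (fun vs => vs ++ [p.2]) else u.insert p.1 [p.2])
      = (fun u p => u.modify p.1 [] (fun vs => vs ++ [p.2])) :=
  funext fun _ => funext fun _ => pv_stepA_eq_modify

-- first-insertion dedup of title-twice-then-description key sequence
theorem pv_ofList_keys (a b : List String) (ha : a.Nodup) (hb : b.Nodup) :
    PySem.Set.ofList (a ++ a ++ b) = a ++ b.filter (fun k => !(PySem.Set.contains a k)) := by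
  have h1 : PySem.Set.update a a = a := by
    rw [PySem.Set.update_eq_append_filter]
    have h2 : List.filter (fun y => !(PySem.Set.contains a y)) (PySem.Set.ofList a) = [] := by
      rw [List.filter_eq_nil_iff]
      intro y hy
      rw [PySem.Set.mem_ofList] at hy
      simp [hy]
    rw [h2]
    simp
  rw [List.append_assoc, PySem.Set.ofList_append, PySem.Set.update_append,
    PySem.Set.ofList_eq_self_of_nodup a ha, h1, PySem.Set.update_eq_append_filter,
    PySem.Set.ofList_eq_self_of_nodup b hb]

theorem gen_entities_eq (title_ents description_ents : List (String × String)) :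
    gen_entities title_ents description_ents = gen_entities_alt title_ents description_ents := by
  unfold gen_entities gen_entities_alt
  set T := PySem.Dict.ofList title_ents with hT
  set D := PySem.Dict.ofList description_ents with hD
  have hTnd : T.keys.Nodup := PySem.Dict.nodup_keys_ofList title_ents
  have hDnd : D.keys.Nodup := PySem.Dict.nodup_keys_ofList description_ents
  simp only [List.foldl_cons, List.foldl_nil, pv_stepA_funext, ← List.foldl_append]
  set L : List (String × String) := T.items ++ T.items ++ D.items with hL
  set U : PySem.Dict String (List String) :=
    L.foldl (fun u p => u.modify p.1 [] (fun vs => vs ++ [p.2])) PySem.Dict.empty with hU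
  -- keys of the merged dict: title keys, then description-only keys
  have hmapL : L.map (fun p => p.1) = T.keys ++ T.keys ++ D.keys := by
    simp [hL, PySem.Dict.keys]
  have hKeys : U.keys = T.keys ++ D.keys.filter (fun k => !(PySem.Set.contains T.keys k)) := by
    rw [hU, PySem.Dict.keys_foldl_modify_key L (fun p => p.1) [] (fun _ p => fun vs => vs ++ [p.2]),
      PySem.Dict.keys_empty, PySem.Set.update_nil_left, hmapL]
    exact pv_ofList_keys T.keys D.keys hTnd hDnd
  have hUnd : U.keys.Nodup := by
    rw [hU]
    exact PySem.Dict.nodup_keys_foldl_modify_key L (fun p => p.1) [] (fun _ p => fun vs => vs ++ [p.2])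
      PySem.Dict.empty (by simp)
  -- per-key multiplicity in the merged dict
  have hLen : ∀ k : String, (U.getD k []).length
      = (if k ∈ T.keys then 2 else 0) + (if k ∈ D.keys then 1 else 0) := by
    intro k
    rw [hU, PySem.Dict.getD_foldl_modify_append, PySem.Dict.getD_empty, hL]
    simp only [List.nil_append, List.length_map, List.filter_append, List.length_append,
      pv_filter_length T k hTnd, pv_filter_length D k hDnd]
    split <;> split <;> omega
  -- the copy loop building ents_dict reproduces the merged items
  have hCopy : (U.items.foldl (fun e p => e.insert p.1 p.2)
      (PySem.Dict.empty : PySem.Dict String (List String))).items = U.items := by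
    rw [PySem.Dict.items_foldl_insert_fresh U.items (fun p => p.1) (fun p => p.2)
      PySem.Dict.empty (fun a _ => PySem.Dict.contains_empty a.1) (by exact hUnd)]
    simp [PySem.Dict.empty]
  rw [hCopy]
  -- both sides are the same insert-fold over the same (key, count) sequence
  rw [PySem.Dict.items_eq_map_keys U hUnd [], List.foldl_map, hKeys, List.foldl_append,
    pv_foldl_skip]
  have hfilter : D.keys.filter (fun k => !T.contains k)
      = D.keys.filter (fun k => !(PySem.Set.contains T.keys k)) := by
    apply List.filter_congr
    intro y _
    rw [PySem.Dict.contains_eq_decide_mem_keys T y, PySem.Set.contains_eq_listContains]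
    simp
  rw [hfilter]
  dsimp only
  refine congrArg PySem.Dict.items ?_
  have h1 : ∀ (acc : PySem.Dict String Int), ∀ k ∈ T.keys,
      acc.insert (pvAdj k) ((U.getD k []).length : Int)
        = acc.insert (pvAdj k) (2 + if D.contains k then (1 : Int) else 0) := by
    intro acc k hk
    have hv : ((U.getD k []).length : Int) = 2 + (if D.contains k then (1 : Int) else 0) := by
      rw [hLen k, PySem.Dict.contains_eq_decide_mem_keys D k]
      by_cases h : k ∈ D.keys <;> simp [h, hk]
    rw [hv]
  rw [PySem.List.foldl_congr_mem T.keys _ _ PySem.Dict.empty h1]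
  apply PySem.List.foldl_congr_mem
  intro acc k hk
  rw [List.mem_filter] at hk
  have hkT : k ∉ T.keys := by simpa [PySem.Set.contains_iff] using hk.2
  have hv : ((U.getD k []).length : Int) = 1 := by
    rw [hLen k]
    simp [hkT, hk.1]
  rw [hv]

-- ===== VERDICT (by name: the statement is the Claim_ definition above) =====
theorem gen_entities_spec : Claim_equal_gen_entities := by
  intro t d _
  unfold Spec_gen_entities
  exact gen_entities_eq t d
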